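-- pv_equiv track=rewrite | github.com/damiankiwi/kurs_python | 19/089.py | find_three_prime_products
-- ===== SOURCE A (Python) =====
-- def generate_primes(limit):
--     primes = [2]
--     num = 3
--
--     while num <= limit:
--         for prime in primes:
--             if prime * prime > num:
--                 primes.append(num)
--                 break
--             if num % prime == 0:
--                 break
--         num += 2
--
--     return primes
--
-- def find_three_prime_products(limit):
--     primes = generate_primes(limit)
--     results = []
--
--     for i in range(len(primes)):
--         for j in range(i, len(primes)):
--             for k in range(j, len(primes)):
--                 product = primes[i] * primes[j] * primes[k]
--                 if product <= limit:
--                     results.append([primes[i], primes[j], primes[k]])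
--
--     return results
-- ===== SOURCE B (Python) =====
-- def generate_primes(limit):
--     primes = [2]
--     num = 3
--
--     while num <= limit:
--         for prime in primes:
--             if prime * prime > num:
--                 primes.append(num)
--                 break
--             if num % prime == 0:
--                 break
--         num += 2
--
--     return primes
--
--
-- def find_three_prime_products(limit):
--     primes = generate_primes(limit)
--     results = []
--     suffix = primes
--     while suffix:
--         p = suffix[0]
--         if p * p * p > limit:
--             break
--         qs = suffix
--         while qs:
--             q = qs[0]
--             if p * q * q > limit:
--                 break
--             for r in qs:
--                 if p * q * r > limit:
--                     break
--                 results.append([p, q, r])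
--             qs = qs[1:]
--         suffix = suffix[1:]
--     return results
-- ===== Notes on version B (the rewrite author's own statement) =====
-- stated objective: faster
-- what changed: B walks suffixes of the sorted prime list and breaks each of the three loops as soon as the product exceeds the limit (products are monotone in sorted primes), instead of A's exhaustive triple index scan over all prime triples.
import Mathlib
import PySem

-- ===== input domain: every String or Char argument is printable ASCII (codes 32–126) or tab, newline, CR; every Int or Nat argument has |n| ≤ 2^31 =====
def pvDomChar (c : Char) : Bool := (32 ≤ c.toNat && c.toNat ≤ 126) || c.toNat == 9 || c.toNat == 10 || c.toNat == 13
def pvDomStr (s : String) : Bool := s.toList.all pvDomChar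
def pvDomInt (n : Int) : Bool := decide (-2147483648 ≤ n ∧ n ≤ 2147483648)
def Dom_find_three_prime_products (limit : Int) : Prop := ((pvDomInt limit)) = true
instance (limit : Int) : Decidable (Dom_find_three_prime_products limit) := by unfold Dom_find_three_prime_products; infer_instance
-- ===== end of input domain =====

-- B replaces A's exhaustive triple index scan by suffix walks over the sorted prime list that
-- break each loop as soon as the product exceeds the limit (objective: faster).

-- ===== PORT A =====
-- helper generate_primes (shared by both Pythons, ported once):
-- the inner 'for prime in primes: … break' decides whether num is appended
def pvCheckAppend : List Int → Int → Bool
  | [], _ => false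
  | p :: rest, num =>
      if p * p > num then true
      else if PySem.Int.mod num p == 0 then false
      else pvCheckAppend rest num

def pvGenLoop (limit : Int) (primes : List Int) (num : Int) : List Int :=
  if num ≤ limit then
    pvGenLoop limit (if pvCheckAppend primes num then primes ++ [num] else primes) (num + 2)
  else primes
termination_by (limit + 1 - num).toNat
decreasing_by omega

def generate_primes (limit : Int) : List Int := pvGenLoop limit [2] 3

def find_three_prime_products (limit : Int) : List (List Int) :=
  let primes := generate_primes limit
  (PySem.List.pyRange 0 (primes.length : Int) 1).foldl (fun results i =>
    (PySem.List.pyRange i (primes.length : Int) 1).foldl (fun results j =>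
      (PySem.List.pyRange j (primes.length : Int) 1).foldl (fun results k =>
        let product := PySem.List.pyGetD primes i 0 * PySem.List.pyGetD primes j 0 * PySem.List.pyGetD primes k 0
        if product ≤ limit then
          results ++ [[PySem.List.pyGetD primes i 0, PySem.List.pyGetD primes j 0, PySem.List.pyGetD primes k 0]]
        else results) results) results) []

-- ===== PORT B =====
-- inner 'for r in qs: if p*q*r > limit: break; append'
def pvInnerB (limit p q : Int) : List Int → List (List Int)
  | [] => []
  | r :: rest => if p * q * r > limit then [] else [p, q, r] :: pvInnerB limit p q rest

-- middle 'while qs: … break; qs = qs[1:]'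
def pvMidB (limit p : Int) : List Int → List (List Int)
  | [] => []
  | q :: rest => if p * q * q > limit then [] else pvInnerB limit p q (q :: rest) ++ pvMidB limit p rest

-- outer 'while suffix: … break; suffix = suffix[1:]'
def pvOuterB (limit : Int) : List Int → List (List Int)
  | [] => []
  | p :: rest => if p * p * p > limit then [] else pvMidB limit p (p :: rest) ++ pvOuterB limit rest

def find_three_prime_products_alt (limit : Int) : List (List Int) :=
  pvOuterB limit (generate_primes limit)

-- ===== PRECONDITION & SPEC =====
def Spec_find_three_prime_products (limit : Int) (out : List (List Int)) : Prop := out = find_three_prime_products_alt limit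
instance (limit : Int) (out : List (List Int)) : Decidable (Spec_find_three_prime_products limit out) := by unfold Spec_find_three_prime_products; infer_instance

-- ===== CLAIM (what is proved, stated in full; the proofs are below) =====
def Claim_equal_find_three_prime_products : Prop := ∀ (limit : Int), Dom_find_three_prime_products limit → Spec_find_three_prime_products limit (find_three_prime_products limit)

-- ===== LEMMAS AND PROOFS =====

-- structural (suffix) reformulation of A's triple index loop, used only in the proofs
def pvInnerA (limit p q : Int) (l : List Int) : List (List Int) :=
  (l.filter (fun r => decide (p * q * r ≤ limit))).map (fun r => [p, q, r])

def pvMidA (limit p : Int) : List Int → List (List Int)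
  | [] => []
  | q :: rest => pvInnerA limit p q (q :: rest) ++ pvMidA limit p rest

def pvOuterA (limit : Int) : List Int → List (List Int)
  | [] => []
  | p :: rest => pvMidA limit p (p :: rest) ++ pvOuterA limit rest

-- A's inner k-loop over range(j, len) is pvInnerA on the suffix
lemma pv_inner_bridge (limit : Int) (P : List Int) (pi pj : Int) (jn : Nat) (acc : List (List Int)) :
    (PySem.List.pyRange (jn : Int) (P.length : Int) 1).foldl (fun results k =>
      if pi * pj * PySem.List.pyGetD P k 0 ≤ limit then
        results ++ [[pi, pj, PySem.List.pyGetD P k 0]]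
      else results) acc
    = acc ++ pvInnerA limit pi pj (P.drop jn) := by
  rw [PySem.List.foldl_pyRange_pyGetD' P 0
        (fun results r => if pi * pj * r ≤ limit then results ++ [[pi, pj, r]] else results) acc
        (Int.natCast_nonneg jn)]
  rw [PySem.List.foldl_append_ite (fun r => pi * pj * r ≤ limit) (fun r => [pi, pj, r])]
  simp [pvInnerA]

-- A's middle j-loop over range(i, len) is pvMidA on the suffix
lemma pv_mid_bridge (limit : Int) (P : List Int) (pi : Int) :
    ∀ (m jn : Nat), P.length - jn = m → jn ≤ P.length → ∀ (acc : List (List Int)),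
    (PySem.List.pyRange (jn : Int) (P.length : Int) 1).foldl (fun results j =>
      (PySem.List.pyRange j (P.length : Int) 1).foldl (fun results k =>
        if pi * PySem.List.pyGetD P j 0 * PySem.List.pyGetD P k 0 ≤ limit then
          results ++ [[pi, PySem.List.pyGetD P j 0, PySem.List.pyGetD P k 0]]
        else results) results) acc
    = acc ++ pvMidA limit pi (P.drop jn) := by
  intro m
  induction m with
  | zero =>
    intro jn hm hle acc
    have hjn : jn = P.length := by omega
    subst hjn
    rw [PySem.List.pyRange_one_eq_nil le_rfl]
    simp [pvMidA, List.drop_length]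
  | succ n ih =>
    intro jn hm hle acc
    have hjn : jn < P.length := by omega
    rw [PySem.List.pyRange_one_cons (by exact_mod_cast hjn)]
    rw [List.foldl_cons]
    have hb := pv_inner_bridge limit P pi (PySem.List.pyGetD P (jn : Int) 0) jn acc
    rw [hb]
    have hcast : ((jn : Int) + 1) = ((jn + 1 : Nat) : Int) := by push_cast; ring
    rw [hcast, ih (jn + 1) (by omega) (by omega)]
    have hget : PySem.List.pyGetD P (jn : Int) 0 = P[jn] := by
      rw [PySem.List.pyGetD_natCast, List.getD_eq_getElem P 0 hjn]
    have hdrop : P.drop jn = P[jn] :: P.drop (jn + 1) := List.drop_eq_getElem_cons hjn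
    rw [hget, hdrop, pvMidA, List.append_assoc]

-- A's outer i-loop is pvOuterA
lemma pv_outer_bridge (limit : Int) (P : List Int) :
    ∀ (m jn : Nat), P.length - jn = m → jn ≤ P.length → ∀ (acc : List (List Int)),
    (PySem.List.pyRange (jn : Int) (P.length : Int) 1).foldl (fun results i =>
      (PySem.List.pyRange i (P.length : Int) 1).foldl (fun results j =>
        (PySem.List.pyRange j (P.length : Int) 1).foldl (fun results k =>
          if PySem.List.pyGetD P i 0 * PySem.List.pyGetD P j 0 * PySem.List.pyGetD P k 0 ≤ limit then
            results ++ [[PySem.List.pyGetD P i 0, PySem.List.pyGetD P j 0, PySem.List.pyGetD P k 0]]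
          else results) results) results) acc
    = acc ++ pvOuterA limit (P.drop jn) := by
  intro m
  induction m with
  | zero =>
    intro jn hm hle acc
    have hjn : jn = P.length := by omega
    subst hjn
    rw [PySem.List.pyRange_one_eq_nil le_rfl]
    simp [pvOuterA, List.drop_length]
  | succ n ih =>
    intro jn hm hle acc
    have hjn : jn < P.length := by omega
    rw [PySem.List.pyRange_one_cons (by exact_mod_cast hjn)]
    rw [List.foldl_cons]
    have hb := pv_mid_bridge limit P (PySem.List.pyGetD P (jn : Int) 0)
      (P.length - jn) jn rfl (le_of_lt hjn) acc
    rw [hb]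
    have hcast : ((jn : Int) + 1) = ((jn + 1 : Nat) : Int) := by push_cast; ring
    rw [hcast, ih (jn + 1) (by omega) (by omega)]
    have hget : PySem.List.pyGetD P (jn : Int) 0 = P[jn] := by
      rw [PySem.List.pyGetD_natCast, List.getD_eq_getElem P 0 hjn]
    have hdrop : P.drop jn = P[jn] :: P.drop (jn + 1) := List.drop_eq_getElem_cons hjn
    rw [hget, hdrop, pvOuterA, List.append_assoc]

lemma pv_A_structural (limit : Int) :
    find_three_prime_products limit = pvOuterA limit (generate_primes limit) := by
  have h := pv_outer_bridge limit (generate_primes limit)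
    (generate_primes limit).length 0 (by omega) (by omega) []
  simpa [find_three_prime_products] using h

-- break-form = filter-form, on a sorted positive list
lemma pv_innerAB (limit p q : Int) (hp : 0 < p) (hq : 0 < q) :
    ∀ (l : List Int), l.Pairwise (· ≤ ·) → pvInnerA limit p q l = pvInnerB limit p q l := by
  intro l
  induction l with
  | nil => intro _; rfl
  | cons r rest ih =>
    intro hs
    rcases List.pairwise_cons.mp hs with ⟨hr, hrest⟩
    by_cases h : limit < p * q * r
    · have hfil : List.filter (fun x => decide (p * q * x ≤ limit)) (r :: rest) = [] := by
        rw [List.filter_eq_nil_iff]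
        intro x hx
        have hrx : r ≤ x := by
          rcases List.mem_cons.mp hx with h1 | h1
          · exact le_of_eq h1.symm
          · exact hr x h1
        simp only [decide_eq_true_eq, not_le]
        nlinarith [mul_nonneg (mul_pos hp hq).le (sub_nonneg.mpr hrx)]
      rw [pvInnerB, if_pos h]
      unfold pvInnerA
      rw [hfil]
      rfl
    · push_neg at h
      rw [pvInnerB, if_neg (not_lt.mpr h)]
      unfold pvInnerA
      rw [List.filter_cons_of_pos (by simpa using h), List.map_cons, ← ih hrest]
      rfl

lemma pv_midA_nil (limit p : Int) (hp : 0 < p) :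
    ∀ (l : List Int), (∀ x ∈ l, 2 ≤ x) → l.Pairwise (· ≤ ·) →
      (∀ q ∈ l, limit < p * q * q) → pvMidA limit p l = [] := by
  intro l
  induction l with
  | nil => intro _ _ _; rfl
  | cons q rest ih =>
    intro h2 hs hq
    rcases List.pairwise_cons.mp hs with ⟨hqle, hrest⟩
    have h2q : (2 : Int) <= q := h2 q List.mem_cons_self
    have hqq : limit < p * q * q := hq q List.mem_cons_self
    have hinner : pvInnerA limit p q (q :: rest) = [] := by
      unfold pvInnerA
      rw [List.filter_eq_nil_iff.mpr, List.map_nil]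
      intro x hx
      have hqx : q ≤ x := by
        rcases List.mem_cons.mp hx with h1 | h1
        · exact le_of_eq h1.symm
        · exact hqle x h1
      simp only [decide_eq_true_eq, not_le]
      nlinarith [mul_nonneg (mul_pos hp (by linarith : (0:Int) < q)).le (sub_nonneg.mpr hqx)]
    rw [pvMidA, hinner, List.nil_append]
    exact ih (fun x hx => h2 x (List.mem_cons_of_mem _ hx)) hrest
      (fun x hx => hq x (List.mem_cons_of_mem _ hx))

lemma pv_midAB (limit p : Int) (hp : 0 < p) :
    ∀ (l : List Int), (∀ x ∈ l, 2 ≤ x) → l.Pairwise (· ≤ ·) →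
      pvMidA limit p l = pvMidB limit p l := by
  intro l
  induction l with
  | nil => intro _ _; rfl
  | cons q rest ih =>
    intro h2 hs
    rcases List.pairwise_cons.mp hs with ⟨hqle, hrest⟩
    have h2q : (2 : Int) <= q := h2 q List.mem_cons_self
    by_cases h : limit < p * q * q
    · rw [pvMidB, if_pos h]
      apply pv_midA_nil limit p hp (q :: rest) h2 hs
      intro x hx
      rcases List.mem_cons.mp hx with h1 | h1
      · subst h1; exact h
      · have hqx : q ≤ x := hqle x h1
        nlinarith [mul_nonneg (mul_nonneg hp.le (sub_nonneg.mpr hqx)) (by linarith : (0:Int) ≤ x + q)]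
    · rw [pvMidB, if_neg h, pvMidA]
      have e1 : pvInnerA limit p q (q :: rest) = pvInnerB limit p q (q :: rest) :=
        pv_innerAB limit p q hp (by linarith) (q :: rest) hs
      rw [e1, ih (fun x hx => h2 x (List.mem_cons_of_mem _ hx)) hrest]

lemma pv_outerA_nil (limit : Int) :
    ∀ (l : List Int), (∀ x ∈ l, 2 ≤ x) → l.Pairwise (· ≤ ·) →
      (∀ p ∈ l, limit < p * p * p) → pvOuterA limit l = [] := by
  intro l
  induction l with
  | nil => intro _ _ _; rfl
  | cons p rest ih =>
    intro h2 hs hp3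
    rcases List.pairwise_cons.mp hs with ⟨hple, hrest⟩
    have h2p : (2 : Int) <= p := h2 p List.mem_cons_self
    have hppp : limit < p * p * p := hp3 p List.mem_cons_self
    rw [pvOuterA]
    have hmid : pvMidA limit p (p :: rest) = [] := by
      apply pv_midA_nil limit p (by linarith) (p :: rest) h2 hs
      intro x hx
      rcases List.mem_cons.mp hx with h1 | h1
      · subst h1; exact hppp
      · have hpx : p ≤ x := hple x h1
        nlinarith [mul_nonneg (mul_nonneg (by linarith : (0:Int) ≤ p) (sub_nonneg.mpr hpx)) (by linarith : (0:Int) ≤ x + p)]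
    rw [hmid, List.nil_append]
    exact ih (fun x hx => h2 x (List.mem_cons_of_mem _ hx)) hrest
      (fun x hx => hp3 x (List.mem_cons_of_mem _ hx))

lemma pv_outerAB (limit : Int) :
    ∀ (l : List Int), (∀ x ∈ l, 2 ≤ x) → l.Pairwise (· ≤ ·) →
      pvOuterA limit l = pvOuterB limit l := by
  intro l
  induction l with
  | nil => intro _ _; rfl
  | cons p rest ih =>
    intro h2 hs
    rcases List.pairwise_cons.mp hs with ⟨hple, hrest⟩
    have h2p : (2 : Int) <= p := h2 p List.mem_cons_self
    by_cases h : limit < p * p * p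
    · rw [pvOuterB, if_pos h]
      apply pv_outerA_nil limit (p :: rest) h2 hs
      intro x hx
      rcases List.mem_cons.mp hx with h1 | h1
      · subst h1; exact h
      · have hpx : p ≤ x := hple x h1
        have h2x : (2 : Int) <= x := h2 x (List.mem_cons_of_mem _ h1)
        nlinarith [mul_nonneg (sub_nonneg.mpr hpx)
          (by nlinarith : (0:Int) ≤ x * x + p * x + p * p)]
    · rw [pvOuterB, if_neg h, pvOuterA]
      have e1 : pvMidA limit p (p :: rest) = pvMidB limit p (p :: rest) :=
        pv_midAB limit p (by linarith) (p :: rest) h2 hs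
      rw [e1, ih (fun x hx => h2 x (List.mem_cons_of_mem _ hx)) hrest]

-- invariant of the prime generator: elements ≥ 2 and nondecreasing
lemma pv_genLoop_inv (limit : Int) :
    ∀ (fuel : Nat) (primes : List Int) (num : Int), (limit + 1 - num).toNat ≤ fuel →
      2 ≤ num → (∀ x ∈ primes, 2 ≤ x) → (∀ x ∈ primes, x < num) →
      primes.Pairwise (· ≤ ·) →
      (∀ x ∈ pvGenLoop limit primes num, 2 ≤ x) ∧ (pvGenLoop limit primes num).Pairwise (· ≤ ·) := by
  intro fuel
  induction fuel with
  | zero =>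
    intro primes num hf _ h2 _ hs
    rw [pvGenLoop, if_neg (by omega)]
    exact ⟨h2, hs⟩
  | succ n ih =>
    intro primes num hf hn h2 hlt hs
    by_cases hle : num ≤ limit
    · rw [pvGenLoop, if_pos hle]
      set primes' := if pvCheckAppend primes num = true then primes ++ [num] else primes with hp'
      have h2' : ∀ x ∈ primes', 2 ≤ x := by
        intro x hx
        rw [hp'] at hx
        split at hx
        · rcases List.mem_append.mp hx with h1 | h1
          · exact h2 x h1
          · rw [List.mem_singleton.mp h1]; exact hn
        · exact h2 x hx
      have hlt' : ∀ x ∈ primes', x < num + 2 := by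
        intro x hx
        rw [hp'] at hx
        split at hx
        · rcases List.mem_append.mp hx with h1 | h1
          · have := hlt x h1; omega
          · rw [List.mem_singleton.mp h1]; omega
        · have := hlt x hx; omega
      have hs' : primes'.Pairwise (· ≤ ·) := by
        rw [hp']
        split
        · exact List.pairwise_append.mpr ⟨hs, List.pairwise_singleton _ _,
            fun a ha b hb => by rw [List.mem_singleton.mp hb]; exact (hlt a ha).le⟩
        · exact hs
      exact ih primes' (num + 2) (by omega) (by omega) h2' hlt' hs'
    · rw [pvGenLoop, if_neg hle]
      exact ⟨h2, hs⟩

lemma pv_gen_inv (limit : Int) :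
    (∀ x ∈ generate_primes limit, 2 ≤ x) ∧ (generate_primes limit).Pairwise (· ≤ ·) := by
  unfold generate_primes
  exact pv_genLoop_inv limit (limit + 1 - 3).toNat [2] 3 le_rfl (by omega)
    (by intro x hx; rw [List.mem_singleton.mp hx])
    (by intro x hx; rw [List.mem_singleton.mp hx]; omega)
    (List.pairwise_singleton _ _)

-- ===== VERDICT (by name: the statement is the Claim_ definition above) =====
theorem find_three_prime_products_spec : Claim_equal_find_three_prime_products := by
  intro limit _
  unfold Spec_find_three_prime_products find_three_prime_products_alt
  rw [pv_A_structural]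
  exact pv_outerAB limit _ (pv_gen_inv limit).1 (pv_gen_inv limit).2
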